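-- pv_equiv track=rewrite | github.com/mcooper/vs-barcode | summarize-metadata/ParseXLSforms.py | getGroupIndices
-- ===== SOURCE A (Python) =====
-- def getGroupIndices(ser):
--     begin_indices = []
--     end_indices = []
--     ct = 0
--     for i in ser:
--         if i == 'begin group':
--             begin_indices.append(ct)
--             end_indices.append(999)
--         if i == 'end group':
--             ind = (len(end_indices) - 1) - end_indices[::-1].index(999)
--             end_indices[ind] = ct
--         ct += 1
--     return list(zip(begin_indices, end_indices))
-- ===== SOURCE B (Python) =====
-- def getGroupIndices(ser):
--     pairs = []   # (begin, end) per group, in begin order; 999 marks a not-yet-closed group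
--     stack = []   # indices into pairs of the currently open groups
--     for ct, token in enumerate(ser):
--         if token == 'begin group':
--             stack.append(len(pairs))
--             pairs.append((ct, 999))
--         elif token == 'end group':
--             j = stack.pop()
--             pairs[j] = (pairs[j][0], ct)
--     return pairs
-- ===== Notes on version B (the rewrite author's own statement) =====
-- stated objective: alternative
-- what changed: Replaces A's per-'end group' reversed-copy-and-scan of the end_indices list (looking for its 999 placeholder) with a stack of open-group indices that is pushed on 'begin group' and popped on 'end group', a single pass that never re-scans the list.
import Mathlib
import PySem

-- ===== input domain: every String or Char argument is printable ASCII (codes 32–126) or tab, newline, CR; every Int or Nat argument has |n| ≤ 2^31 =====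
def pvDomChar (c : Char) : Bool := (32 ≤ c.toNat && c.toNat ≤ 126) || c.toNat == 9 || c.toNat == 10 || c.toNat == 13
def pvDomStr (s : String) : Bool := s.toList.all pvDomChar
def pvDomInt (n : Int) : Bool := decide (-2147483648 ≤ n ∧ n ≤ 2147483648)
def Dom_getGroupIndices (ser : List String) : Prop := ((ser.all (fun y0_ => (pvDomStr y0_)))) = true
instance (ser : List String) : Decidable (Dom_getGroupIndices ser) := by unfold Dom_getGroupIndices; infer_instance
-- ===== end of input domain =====

-- B pairs groups with an explicit stack of open-group indices (push on 'begin group', pop on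
-- 'end group') instead of A's per-'end group' reversed scan of end_indices for its 999 placeholder.


-- ===== PORT A =====
-- state: (begin_indices, end_indices, ct)
def stepA (s : List Int × List Int × Int) (i : String) : List Int × List Int × Int :=
  let b := if i = "begin group" then s.1 ++ [s.2.2] else s.1
  let e := if i = "begin group" then s.2.1 ++ [(999 : Int)] else s.2.1
  let e' := if i = "end group" then
      match PySem.List.index? e.reverse (999 : Int) with
      | some k => e.set (e.length - 1 - k) s.2.2
      | none => e          -- Python raises ValueError here; excluded by Pre_
    else e
  (b, e', s.2.2 + 1)

def getGroupIndices (ser : List String) : List (List Int) :=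
  let st := ser.foldl stepA ([], [], 0)
  List.zipWith (fun a b => [a, b]) st.1 st.2.1

-- ===== PORT B =====
-- state: (pairs, stack, ct); stack holds indices into pairs of the currently open groups
def stepB (s : List (Int × Int) × List Nat × Int) (token : String) :
    List (Int × Int) × List Nat × Int :=
  if token = "begin group" then
    (s.1 ++ [(s.2.2, (999 : Int))], s.2.1 ++ [s.1.length], s.2.2 + 1)
  else if token = "end group" then
    match s.2.1.getLast? with       -- stack.pop()
    | some j => (s.1.set j ((s.1.getD j (0, 0)).1, s.2.2), s.2.1.dropLast, s.2.2 + 1)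
    | none => (s.1, s.2.1, s.2.2 + 1)   -- Python raises IndexError here; excluded by Pre_
  else (s.1, s.2.1, s.2.2 + 1)

def getGroupIndices_alt (ser : List String) : List (List Int) :=
  ((ser.foldl stepB ([], [], 0)).1).map (fun p => [p.1, p.2])

-- ===== PRECONDITION & SPEC =====
-- Pre_ excludes (a) inputs where some 'end group' has no matching open group — Python A raises
-- ValueError there (and Python B raises IndexError) — and (b) inputs with 'end group' at index 999,
-- where A's written end index collides with its own 999 placeholder, an artefact of A's sentinel
-- representation that a later 'end group' then re-matches; no re-implementation could match that.
def Pre_getGroupIndices (ser : List String) : Prop :=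
  (∀ n ∈ List.range (ser.length + 1),
      (ser.take n).count "end group" ≤ (ser.take n).count "begin group") ∧
  ser.getD 999 "" ≠ "end group"
instance (ser : List String) : Decidable (Pre_getGroupIndices ser) := by
  unfold Pre_getGroupIndices; infer_instance

def pvWitness_getGroupIndices : List String :=
  ["begin group", "x", "begin group", "end group", "end group", "y"]

def Spec_getGroupIndices (ser : List String) (out : List (List Int)) : Prop :=
  out = getGroupIndices_alt ser
instance (ser : List String) (out : List (List Int)) : Decidable (Spec_getGroupIndices ser out) := by
  unfold Spec_getGroupIndices; infer_instance

-- ===== CLAIM (what is proved, stated in full; the proofs are below) =====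
def Claim_equal_getGroupIndices : Prop := ∀ (ser : List String), Dom_getGroupIndices ser →
  Pre_getGroupIndices ser → Spec_getGroupIndices ser (getGroupIndices ser)

-- ===== LEMMAS AND PROOFS =====

-- positions of the 999 placeholder in A's end_indices list (= B's stack, proved below)
def posOpen (e : List Int) : List Nat :=
  (List.range e.length).filter (fun j => e.getD j 0 == 999)

lemma mem_posOpen {e : List Int} {j : Nat} :
    j ∈ posOpen e ↔ j < e.length ∧ e.getD j 0 = 999 := by
  simp [posOpen, List.mem_filter]

lemma posOpen_sorted (e : List Int) : (posOpen e).Pairwise (· < ·) :=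
  List.Pairwise.filter _ (List.pairwise_lt_range)

lemma posOpen_append_999 (e : List Int) :
    posOpen (e ++ [(999 : Int)]) = posOpen e ++ [e.length] := by
  unfold posOpen
  rw [List.length_append, List.length_singleton, List.range_succ, List.filter_append]
  congr 1
  · apply List.filter_congr
    intro j hj
    simp only [List.mem_range] at hj
    rw [List.getD_eq_getElem _ _ (by simp; omega), List.getD_eq_getElem _ _ hj,
      List.getElem_append_left hj]
  · simp [List.getD_eq_getElem?_getD]

lemma posOpen_nil_index (e : List Int) (h : posOpen e = []) :
    PySem.List.index? e.reverse (999 : Int) = none := by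
  rw [PySem.List.index?_eq_none_iff, List.mem_reverse]
  intro hmem
  obtain ⟨j, hj, hget⟩ := List.mem_iff_getElem.mp hmem
  have : j ∈ posOpen e := mem_posOpen.mpr ⟨hj, by rw [List.getD_eq_getElem _ _ hj, hget]⟩
  simp [h] at this

lemma posOpen_last {e : List Int} {s : List Nat} {L : Nat} (h : posOpen e = s ++ [L]) :
    L < e.length ∧ e.getD L 0 = 999 ∧ (∀ j, L < j → j < e.length → e.getD j 0 ≠ 999) ∧ L ∉ s := by
  have hLmem : L ∈ posOpen e := by rw [h]; simp
  have hL := mem_posOpen.mp hLmem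
  have hsorted := posOpen_sorted e
  rw [h] at hsorted
  have hlt : ∀ a ∈ s, a < L := by
    intro a ha
    have := List.pairwise_append.mp hsorted
    exact this.2.2 a ha L (by simp)
  refine ⟨hL.1, hL.2, ?_, fun hmem => lt_irrefl L (hlt L hmem)⟩
  intro j hLj hj hget
  have : j ∈ posOpen e := mem_posOpen.mpr ⟨hj, hget⟩
  rw [h] at this
  rcases List.mem_append.mp this with hs | hL'
  · exact absurd (hlt j hs) (by omega)
  · simp at hL'; omega

lemma decompose_at_last {e : List Int} {s : List Nat} {L : Nat} (h : posOpen e = s ++ [L]) :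
    e = e.take L ++ (999 : Int) :: e.drop (L + 1) ∧
      ∀ x ∈ e.drop (L + 1), x ≠ (999 : Int) := by
  obtain ⟨hLlen, hget, hmax, -⟩ := posOpen_last h
  constructor
  · conv_lhs => rw [← List.take_append_drop L e]
    congr 1
    rw [List.drop_eq_getElem_cons hLlen]
    congr 1
    rw [List.getD_eq_getElem _ _ hLlen] at hget
    exact hget
  · intro x hx
    obtain ⟨i, hi, hgi⟩ := List.mem_iff_getElem.mp hx
    rw [List.getElem_drop] at hgi
    simp only [List.length_drop] at hi
    have hlen : L + 1 + i < e.length := by omega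
    intro hx999
    exact hmax (L + 1 + i) (by omega) hlen
      (by rw [List.getD_eq_getElem _ _ hlen, hgi, hx999])

lemma index_reverse_of_last {e : List Int} {s : List Nat} {L : Nat} (h : posOpen e = s ++ [L]) :
    PySem.List.index? e.reverse (999 : Int) = some (e.length - 1 - L) := by
  obtain ⟨hdec, hnot⟩ := decompose_at_last h
  obtain ⟨hLlen, -, -, -⟩ := posOpen_last h
  rw [PySem.List.index?_eq_some_iff]
  refine ⟨(e.drop (L + 1)).reverse, (e.take L).reverse, ?_, ?_, ?_⟩
  · conv_lhs => rw [hdec]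
    simp
  · simp [List.length_drop]; omega
  · intro hmem
    exact hnot 999 (List.mem_reverse.mp hmem) rfl

lemma posOpen_set {e : List Int} {s : List Nat} {L : Nat} {ct : Int}
    (h : posOpen e = s ++ [L]) (hct : ct ≠ 999) : posOpen (e.set L ct) = s := by
  obtain ⟨hLlen, -, -, hLs⟩ := posOpen_last h
  unfold posOpen
  rw [List.length_set]
  have hstep : (List.range e.length).filter (fun j => (e.set L ct).getD j 0 == 999) =
      ((List.range e.length).filter (fun j => e.getD j 0 == 999)).filter (fun j => j ≠ L) := by
    rw [List.filter_filter]
    apply List.filter_congr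
    intro j hj
    simp only [List.mem_range] at hj
    rw [List.getD_eq_getElem _ _ (by simpa using hj), List.getD_eq_getElem _ _ hj,
      List.getElem_set]
    by_cases hjL : j = L
    · subst hjL; simp [hct]
    · rw [if_neg (fun h' => hjL h'.symm)]
      simp [hjL]
  rw [hstep]
  have h' : (List.range e.length).filter (fun j => e.getD j 0 == 999) = s ++ [L] := h
  rw [h', List.filter_append]
  have h1 : s.filter (fun j => j ≠ L) = s :=
    List.filter_eq_self.mpr (fun a ha => by simp; rintro rfl; exact hLs ha)
  have h2 : [L].filter (fun j => j ≠ L) = ([] : List Nat) := by simp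
  rw [h1, h2, List.append_nil]

lemma zip_set {b e : List Int} {L : Nat} {ct : Int}
    (hlen : b.length = e.length) (hL : L < e.length) :
    (b.zip e).set L (((b.zip e).getD L (0, 0)).1, ct) = b.zip (e.set L ct) := by
  have hLb : L < b.length := by omega
  have hLz : L < (b.zip e).length := by simp [List.length_zip]; omega
  have hgd : (b.zip e).getD L (0, 0) = (b[L], e[L]) := by
    rw [List.getD_eq_getElem _ _ hLz, List.getElem_zip]
  apply List.ext_getElem
  · simp [List.length_zip]
  · intro i h1 h2
    have hie : i < e.length := by simp [List.length_zip] at h2; omega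
    have hib : i < b.length := by omega
    rw [List.getElem_set]
    by_cases hiL : i = L
    · subst hiL
      rw [if_pos rfl, hgd, List.getElem_zip, List.getElem_set, if_pos rfl]
    · have hLi : ¬ L = i := fun h' => hiL h'.symm
      rw [if_neg hLi, List.getElem_zip, List.getElem_zip, List.getElem_set, if_neg hLi]

-- one loop iteration preserves the state correspondence
lemma step_agree (b e : List Int) (ct : Int) (x : String)
    (hlen : b.length = e.length) (hct : x = "end group" → ct ≠ 999) :
    stepB (b.zip e, posOpen e, ct) x =
      ((stepA (b, e, ct) x).1.zip (stepA (b, e, ct) x).2.1,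
        posOpen (stepA (b, e, ct) x).2.1, (stepA (b, e, ct) x).2.2) ∧
    (stepA (b, e, ct) x).1.length = (stepA (b, e, ct) x).2.1.length := by
  by_cases hb : x = "begin group"
  · subst hb
    have eA : stepA (b, e, ct) "begin group" = (b ++ [ct], e ++ [(999 : Int)], ct + 1) := by
      simp [stepA]
    have eB : stepB (b.zip e, posOpen e, ct) "begin group" =
        (b.zip e ++ [(ct, 999)], posOpen e ++ [(b.zip e).length], ct + 1) := by
      simp [stepB]
    rw [eA, eB]
    refine ⟨?_, by simp [hlen]⟩
    rw [posOpen_append_999, List.zip_append hlen]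
    simp [List.length_zip, hlen]
  · by_cases he : x = "end group"
    · subst he
      have hct999 := hct rfl
      rcases List.eq_nil_or_concat (posOpen e) with heq | ⟨s, L, heq⟩
      · -- no open group: both branches are no-ops
        have hidx : List.idxOf? (999 : Int) e.reverse = none := by
          simpa using posOpen_nil_index e heq
        have eA : stepA (b, e, ct) "end group" = (b, e, ct + 1) := by simp [stepA, hidx]
        have eB : stepB (b.zip e, posOpen e, ct) "end group" = (b.zip e, posOpen e, ct + 1) := by
          rw [heq]; simp [stepB]
        rw [eA, eB, heq]
        exact ⟨rfl, hlen⟩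
      · rw [List.concat_eq_append] at heq
        obtain ⟨hLlen, -, -, -⟩ := posOpen_last heq
        have hidx : List.idxOf? (999 : Int) e.reverse = some (e.length - 1 - L) := by
          simpa using index_reverse_of_last heq
        have harith : e.length - 1 - (e.length - 1 - L) = L := by omega
        have eA : stepA (b, e, ct) "end group" = (b, e.set L ct, ct + 1) := by
          simp [stepA, hidx, harith]
        have eB : stepB (b.zip e, posOpen e, ct) "end group" =
            ((b.zip e).set L (((b.zip e).getD L (0, 0)).1, ct), s, ct + 1) := by
          rw [heq]; simp [stepB]
        rw [eA, eB, zip_set hlen hLlen, posOpen_set heq hct999]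
        exact ⟨rfl, by simp [hlen]⟩
    · have eA : stepA (b, e, ct) x = (b, e, ct + 1) := by simp [stepA, hb, he]
      have eB : stepB (b.zip e, posOpen e, ct) x = (b.zip e, posOpen e, ct + 1) := by
        simp [stepB, hb, he]
      rw [eA, eB]
      exact ⟨rfl, hlen⟩

lemma step_ct (b e : List Int) (ct : Int) (x : String) :
    (stepA (b, e, ct) x).2.2 = ct + 1 := by
  simp [stepA]

lemma fold_agree : ∀ (rest : List String) (b e : List Int) (ct : Int),
    b.length = e.length →
    (∀ j, j < rest.length → rest.getD j "" = "end group" → ct + (j : Int) ≠ 999) →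
    rest.foldl stepB (b.zip e, posOpen e, ct) =
      ((rest.foldl stepA (b, e, ct)).1.zip (rest.foldl stepA (b, e, ct)).2.1,
        posOpen (rest.foldl stepA (b, e, ct)).2.1, (rest.foldl stepA (b, e, ct)).2.2) := by
  intro rest
  induction rest with
  | nil =>
    intro b e ct hlen _
    simp
  | cons x rest ih =>
    intro b e ct hlen hctx
    have hct : x = "end group" → ct ≠ 999 := by
      intro hx
      have := hctx 0 (by simp) (by simpa using hx)
      simpa using this
    obtain ⟨hstep, hlen'⟩ := step_agree b e ct x hlen hct
    have hctx' : ∀ j, j < rest.length → rest.getD j "" = "end group" →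
        (stepA (b, e, ct) x).2.2 + (j : Int) ≠ 999 := by
      intro j hj hget
      rw [step_ct]
      have := hctx (j + 1) (by simpa using Nat.succ_lt_succ hj) (by simpa using hget)
      push_cast at this ⊢
      omega
    have hmk : ((stepA (b, e, ct) x).1, (stepA (b, e, ct) x).2.1, (stepA (b, e, ct) x).2.2) =
        stepA (b, e, ct) x := rfl
    simp only [List.foldl_cons]
    rw [hstep]
    rw [ih (stepA (b, e, ct) x).1 (stepA (b, e, ct) x).2.1 (stepA (b, e, ct) x).2.2 hlen' hctx',
      hmk]

lemma map_zip_pair (l1 l2 : List Int) :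
    (l1.zip l2).map (fun p => [p.1, p.2]) = List.zipWith (fun a b => [a, b]) l1 l2 := by
  induction l1 generalizing l2 with
  | nil => simp
  | cons x t ih => cases l2 with
    | nil => simp
    | cons y u => simp [ih]

-- ===== VERDICT (by name: the statement is the Claim_ definition above) =====
theorem getGroupIndices_spec : Claim_equal_getGroupIndices := by
  intro ser _hdom hpre
  unfold Spec_getGroupIndices getGroupIndices getGroupIndices_alt
  have hctx : ∀ j, j < ser.length → ser.getD j "" = "end group" → (0 : Int) + (j : Int) ≠ 999 := by
    intro j _ hget heq
    have hj : j = 999 := by omega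
    exact hpre.2 (hj ▸ hget)
  have h := fold_agree ser [] [] 0 rfl hctx
  have hz : ([] : List Int).zip ([] : List Int) = ([] : List (Int × Int)) := rfl
  have hp : posOpen ([] : List Int) = [] := rfl
  rw [hz, hp] at h
  rw [h]
  simp [map_zip_pair]
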